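-- pv_equiv track=rewrite | github.com/curation-bot-guy/Curation-Validation-Bot | bot.py | parse_lines_until_multiline
-- ===== SOURCE A (Python) =====
-- from typing import List, Tuple
--
-- def parse_lines_until_multiline(lines: List[str], d: dict, starting_number: int):
--     break_number: int = -1
--     for idx, line in enumerate(lines[starting_number:]):
--         if '|' not in line:
--             split: List[str] = line.split(":")
--             split: List[str] = [x.strip(' ') for x in split]
--             d.update({split[0]: split[1]})
--         else:
--             break_number = idx
--             break
--     return d, break_number
-- ===== SOURCE B (Python) =====
-- from typing import List
--
-- def parse_lines_until_multiline(lines: List[str], d: dict, starting_number: int):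
--     tail = lines[starting_number:]
--     break_number = next((i for i, line in enumerate(tail) if '|' in line), -1)
--     for line in (tail if break_number == -1 else tail[:break_number]):
--         parts = [p.strip(' ') for p in line.split(':')]
--         d.update({parts[0]: parts[1]})
--     return d, break_number
-- ===== Notes on version B (the rewrite author's own statement) =====
-- stated objective: alternative
-- what changed: B separates boundary-finding from parsing: it first scans the slice for the index of the first line containing '|' (default -1), then parses only the prefix before that boundary in a plain loop, instead of A's single fused enumerate-loop with break.
import Mathlib
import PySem

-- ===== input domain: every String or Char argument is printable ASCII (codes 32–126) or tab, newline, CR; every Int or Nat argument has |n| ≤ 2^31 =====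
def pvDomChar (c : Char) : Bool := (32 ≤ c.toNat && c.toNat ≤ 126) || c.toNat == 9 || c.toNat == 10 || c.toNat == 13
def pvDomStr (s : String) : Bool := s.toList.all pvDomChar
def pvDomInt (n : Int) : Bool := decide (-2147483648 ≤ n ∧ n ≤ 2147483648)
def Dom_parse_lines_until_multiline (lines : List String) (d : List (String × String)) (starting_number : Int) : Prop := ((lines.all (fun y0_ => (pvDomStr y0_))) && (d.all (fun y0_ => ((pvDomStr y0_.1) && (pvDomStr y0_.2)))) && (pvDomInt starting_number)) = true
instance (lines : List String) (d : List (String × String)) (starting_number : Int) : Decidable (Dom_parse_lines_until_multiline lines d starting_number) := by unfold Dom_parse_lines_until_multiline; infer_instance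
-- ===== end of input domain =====

-- B separates boundary-finding (first '|' line of the slice) from parsing into two passes
-- instead of A's single fused loop with break; equal return value on Pre_, and both mutate d alike.


-- ===== PORT A =====
-- d.update({split[0]: split[1]}): split[1] raises IndexError when the line has no ':';
-- Pre_ excludes exactly those inputs, the port totalizes the unreached access with "".
def pvA_go (rest : List String) (idx : Int) (d : PySem.Dict String String) : PySem.Dict String String × Int :=
  match rest with
  | [] => (d, -1)
  | line :: t =>
    if PySem.Str.isIn "|" line = false then
      -- line.split(":"): sep is the non-empty ":", so split? is always some; getD [] is unreached
      let split := (PySem.Str.split? line ":").getD []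
      let split := split.map (fun x => PySem.Str.stripChars x " ")
      pvA_go t (idx + 1) (d.insert ((PySem.List.pyGet? split 0).getD "") ((PySem.List.pyGet? split 1).getD ""))
    else (d, idx)

def parse_lines_until_multiline (lines : List String) (d : List (String × String)) (starting_number : Int) : (List (String × String)) × Int :=
  let r := pvA_go (PySem.List.slice lines (some starting_number) none) 0 (PySem.Dict.mk d)
  (r.1.items, r.2)

-- ===== PORT B =====
-- next((i for i, line in enumerate(tail) if '|' in line), -1)
def pvB_break (rest : List String) (i : Int) : Int :=
  match rest with
  | [] => -1
  | line :: t => if PySem.Str.isIn "|" line then i else pvB_break t (i + 1)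

def pvB_step (dd : PySem.Dict String String) (line : String) : PySem.Dict String String :=
  -- line.split(":"): sep non-empty, split? is always some
  let parts := ((PySem.Str.split? line ":").getD []).map (fun p => PySem.Str.stripChars p " ")
  dd.insert ((PySem.List.pyGet? parts 0).getD "") ((PySem.List.pyGet? parts 1).getD "")

def parse_lines_until_multiline_alt (lines : List String) (d : List (String × String)) (starting_number : Int) : (List (String × String)) × Int :=
  let tail := PySem.List.slice lines (some starting_number) none
  let break_number := pvB_break tail 0
  let pfx := if break_number = -1 then tail else PySem.List.slice tail none (some break_number)
  ((pfx.foldl pvB_step (PySem.Dict.mk d)).items, break_number)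

-- ===== PRECONDITION & SPEC =====
-- Pre_ excludes exactly the inputs on which the Python A raises IndexError: a line without ':' in
-- the slice before the first line containing '|' (B raises the same IndexError there).
def Pre_parse_lines_until_multiline (lines : List String) (d : List (String × String)) (starting_number : Int) : Prop :=
  ((PySem.List.slice lines (some starting_number) none).takeWhile
      (fun l => !(PySem.Str.isIn "|" l))).all (fun l => PySem.Str.isIn ":" l) = true
instance (lines : List String) (d : List (String × String)) (starting_number : Int) : Decidable (Pre_parse_lines_until_multiline lines d starting_number) := by unfold Pre_parse_lines_until_multiline; infer_instance

def pvWitness_parse_lines_until_multiline : List String × (List (String × String)) × Int :=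
  ([" a : 1", "b:2", "x | y", "junk"], [("k", "v")], 0)

def Spec_parse_lines_until_multiline (lines : List String) (d : List (String × String)) (starting_number : Int) (out : (List (String × String)) × Int) : Prop := out = parse_lines_until_multiline_alt lines d starting_number
instance (lines : List String) (d : List (String × String)) (starting_number : Int) (out : (List (String × String)) × Int) : Decidable (Spec_parse_lines_until_multiline lines d starting_number out) := by unfold Spec_parse_lines_until_multiline; infer_instance

-- ===== CLAIM (what is proved, stated in full; the proofs are below) =====
def Claim_equal_parse_lines_until_multiline : Prop := ∀ (lines : List String) (d : List (String × String)) (starting_number : Int), Dom_parse_lines_until_multiline lines d starting_number → Pre_parse_lines_until_multiline lines d starting_number → Spec_parse_lines_until_multiline lines d starting_number (parse_lines_until_multiline lines d starting_number)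

-- ===== LEMMAS AND PROOFS =====

lemma pvB_break_cons (h : String) (tl : List String) (i : Int) :
    pvB_break (h :: tl) i = if PySem.Str.isIn "|" h then i else pvB_break tl (i + 1) := rfl

lemma pvA_go_cons (h : String) (tl : List String) (idx : Int) (d : PySem.Dict String String) :
    pvA_go (h :: tl) idx d =
      if PySem.Str.isIn "|" h = false then
        pvA_go tl (idx + 1)
          (d.insert ((PySem.List.pyGet? (((PySem.Str.split? h ":").getD []).map (fun x => PySem.Str.stripChars x " ")) 0).getD "")
                    ((PySem.List.pyGet? (((PySem.Str.split? h ":").getD []).map (fun x => PySem.Str.stripChars x " ")) 1).getD ""))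
      else (d, idx) := rfl

lemma pvB_break_nonneg (t : List String) (i : Int) :
    pvB_break t i = -1 ∨ i ≤ pvB_break t i := by
  induction t generalizing i with
  | nil => left; rfl
  | cons h tl ih =>
    rw [pvB_break_cons]
    by_cases hb : PySem.Str.isIn "|" h = true
    · rw [if_pos hb]; right; omega
    · rw [if_neg hb]
      rcases ih (i + 1) with h1 | h1
      · left; exact h1
      · right; omega

lemma pvB_break_shift (t : List String) (i : Int) :
    pvB_break t i = if pvB_break t 0 = -1 then -1 else i + pvB_break t 0 := by
  induction t generalizing i with
  | nil => rfl
  | cons h tl ih =>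
    rw [pvB_break_cons, pvB_break_cons]
    by_cases hb : PySem.Str.isIn "|" h = true
    · rw [if_pos hb, if_pos hb, if_neg (by omega : ¬ (0:Int) = -1)]; omega
    · rw [if_neg hb, if_neg hb, ih (i + 1), ih (0 + 1)]
      rcases pvB_break_nonneg tl 0 with h1 | h1
      · simp [h1]
      · have hne : pvB_break tl 0 ≠ -1 := by omega
        rw [if_neg hne, if_neg hne, if_neg (by omega : ¬ (0:Int) + 1 + pvB_break tl 0 = -1)]
        omega

lemma pvB_prefix_eq_takeWhile (t : List String) :
    (if pvB_break t 0 = -1 then t else PySem.List.slice t none (some (pvB_break t 0)))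
      = t.takeWhile (fun l => !(PySem.Str.isIn "|" l)) := by
  induction t with
  | nil => simp [pvB_break]
  | cons h tl ih =>
    rw [pvB_break_cons, List.takeWhile_cons]
    by_cases hb : PySem.Str.isIn "|" h = true
    · rw [if_pos hb, if_neg (show ¬ ((!PySem.Str.isIn "|" h) = true) by rw [hb]; decide),
          if_neg (by omega : ¬ (0:Int) = -1), PySem.List.slice_to (hb := le_refl 0)]
      rfl
    · have hb' : PySem.Str.isIn "|" h = false := by
        cases hc : PySem.Str.isIn "|" h
        · rfl
        · exact absurd hc hb
      rw [if_neg hb, if_pos (show (!PySem.Str.isIn "|" h) = true by rw [hb']; rfl),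
          pvB_break_shift tl (0 + 1)]
      rcases pvB_break_nonneg tl 0 with h1 | h1
      · rw [if_pos h1, if_pos rfl, ← ih, if_pos h1]
      · have hne : pvB_break tl 0 ≠ -1 := by omega
        rw [if_neg hne, if_neg (by omega : ¬ (0:Int) + 1 + pvB_break tl 0 = -1),
            PySem.List.slice_to (hb := by omega)]
        have ht : ((0:Int) + 1 + pvB_break tl 0).toNat = (pvB_break tl 0).toNat + 1 := by omega
        rw [ht, List.take_succ_cons]
        have h2 := ih
        rw [if_neg hne, PySem.List.slice_to (hb := by omega)] at h2
        rw [h2]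

lemma pvA_go_eq (t : List String) (idx : Int) (d : PySem.Dict String String) :
    pvA_go t idx d =
      ((t.takeWhile (fun l => !(PySem.Str.isIn "|" l))).foldl pvB_step d, pvB_break t idx) := by
  induction t generalizing idx d with
  | nil => rfl
  | cons h tl ih =>
    rw [pvA_go_cons, pvB_break_cons, List.takeWhile_cons]
    by_cases hb : PySem.Str.isIn "|" h = true
    · rw [if_pos hb, if_neg (show ¬ (PySem.Str.isIn "|" h = false) by rw [hb]; decide),
          if_neg (show ¬ ((!PySem.Str.isIn "|" h) = true) by rw [hb]; decide)]
      rfl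
    · have hb' : PySem.Str.isIn "|" h = false := by
        cases hc : PySem.Str.isIn "|" h
        · rfl
        · exact absurd hc hb
      rw [if_neg hb, if_pos hb', if_pos (show (!PySem.Str.isIn "|" h) = true by rw [hb']; rfl), ih]
      rfl

-- ===== VERDICT (by name: the statement is the Claim_ definition above) =====
theorem parse_lines_until_multiline_spec : Claim_equal_parse_lines_until_multiline := by
  intro lines d sn _ _
  unfold Spec_parse_lines_until_multiline parse_lines_until_multiline parse_lines_until_multiline_alt
  rw [pvA_go_eq, ← pvB_prefix_eq_takeWhile]
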